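-- pv_equiv track=rewrite | github.com/UNS-JeromeWei/quick-witted | VoltageSetting_opt.py | find_monotonic_intervals_without_threshold
-- ===== SOURCE A (Python) =====
-- def find_monotonic_intervals_without_threshold(arr):
--     """
--     查找数组中的单调区间，并返回每个区间的起始和结束索引。
--
--     Args:
--         arr (list): 输入的数组。
--
--     Returns:
--         list: 包含单调区间的元组列表，每个元组包含起始和结束索引。
--     """
--     intervals = []
--     start = 0
--
--     for i in range(1, len(arr)):
--         if arr[i] < arr[i - 1] or arr[i] > arr[i - 1]:
--             # 当前元素与前一个元素不相等，表示一个区间结束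
--             intervals.append((start, i - 1))
--             start = i
--
--     # 添加最后一个区间
--     intervals.append((start, len(arr) - 1))
--
--     return intervals
-- ===== SOURCE B (Python) =====
-- def find_monotonic_intervals_without_threshold(arr):
--     # Run-length decomposition: first compress the array into lengths of maximal
--     # runs of equal consecutive values (no index arithmetic), then convert the
--     # lengths into (start, end) index pairs by accumulating offsets.
--     lens = []
--     for x in arr:
--         if lens and not (x < prev or x > prev):
--             lens[-1] += 1
--         else:
--             lens.append(1)
--         prev = x
--     intervals = []
--     pos = 0
--     for n in lens:
--         intervals.append((pos, pos + n - 1))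
--         pos += n
--     return intervals
-- ===== Notes on version B (the rewrite author's own statement) =====
-- stated objective: alternative
-- what changed: Replaces A's index loop (comparing arr[i] to arr[i-1] while carrying the current run start) by a run-length decomposition: first compress the array into lengths of maximal equal runs working on values only, then turn the lengths into (start,end) pairs by accumulating offsets.
-- intended difference: On the empty list A returns [(0, -1)], a degenerate interval with end before start that is an artifact of its unconditional final append; B returns [], the intended 'no runs' answer. — e.g. on find_monotonic_intervals_without_threshold([]): A returns [(0, -1)], B returns []
import Mathlib
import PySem

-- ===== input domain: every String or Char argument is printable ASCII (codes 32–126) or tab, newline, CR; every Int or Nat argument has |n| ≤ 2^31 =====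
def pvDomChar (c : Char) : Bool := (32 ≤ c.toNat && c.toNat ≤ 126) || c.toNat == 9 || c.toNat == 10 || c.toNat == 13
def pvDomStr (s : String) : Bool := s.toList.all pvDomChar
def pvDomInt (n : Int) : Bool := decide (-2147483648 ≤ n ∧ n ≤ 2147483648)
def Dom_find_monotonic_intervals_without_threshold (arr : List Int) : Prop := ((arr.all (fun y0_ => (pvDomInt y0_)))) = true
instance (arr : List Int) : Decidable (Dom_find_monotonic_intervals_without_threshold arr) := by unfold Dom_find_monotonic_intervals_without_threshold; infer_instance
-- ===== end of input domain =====

-- B replaces A's index loop by run-length encoding of equal runs followed by an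
-- offset-accumulating conversion of lengths to intervals; objective: alternative
-- decomposition, same O(n) cost. On the empty list B returns [] where A returns [(0,-1)].


-- ===== PORT A =====
-- Literal port of A: one loop over range(1, len(arr)) carrying (intervals, start).
def find_monotonic_intervals_without_threshold (arr : List Int) : List (Int × Int) :=
  let r := (PySem.List.pyRange 1 (arr.length : Int) 1).foldl
    (fun (st : List (Int × Int) × Int) (i : Int) =>
      if PySem.List.pyGetD arr i 0 < PySem.List.pyGetD arr (i - 1) 0 ∨
         PySem.List.pyGetD arr i 0 > PySem.List.pyGetD arr (i - 1) 0 then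
        (st.1 ++ [(st.2, i - 1)], i)
      else st)
    ([], 0)
  r.1 ++ [(r.2, (arr.length : Int) - 1)]

-- ===== PORT B =====
-- Literal port of B: pass 1 folds over the VALUES building the run-length list
-- (`lens[-1] += 1` is dropLast ++ [last+1]); pass 2 folds over the lengths
-- accumulating (intervals, pos). `prev` starts arbitrary (0): Python only reads
-- it once `lens` is nonempty, i.e. after it has been assigned.
def find_monotonic_intervals_without_threshold_alt (arr : List Int) : List (Int × Int) :=
  let p1 := arr.foldl
    (fun (st : List Int × Int) (x : Int) =>
      if st.1 ≠ [] ∧ ¬ (x < st.2 ∨ x > st.2) then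
        (st.1.dropLast ++ [st.1.getLastD 0 + 1], x)
      else (st.1 ++ [1], x))
    ([], 0)
  let p2 := p1.1.foldl
    (fun (st : List (Int × Int) × Int) (n : Int) =>
      (st.1 ++ [(st.2, st.2 + n - 1)], st.2 + n))
    ([], 0)
  p2.1

-- ===== PRECONDITION & SPEC =====
-- On the empty list A returns [(0, -1)], a degenerate interval with end before start
-- (an artifact of its unconditional final append); B returns [], the intended answer.
def D_find_monotonic_intervals_without_threshold (arr : List Int) : Prop := arr = []
instance (arr : List Int) : Decidable (D_find_monotonic_intervals_without_threshold arr) := by unfold D_find_monotonic_intervals_without_threshold; infer_instance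
def Spec_find_monotonic_intervals_without_threshold (arr : List Int) (out : List (Int × Int)) : Prop := ¬ D_find_monotonic_intervals_without_threshold arr → out = find_monotonic_intervals_without_threshold_alt arr
instance (arr : List Int) (out : List (Int × Int)) : Decidable (Spec_find_monotonic_intervals_without_threshold arr out) := by unfold Spec_find_monotonic_intervals_without_threshold; infer_instance
def pvDiffWitness_find_monotonic_intervals_without_threshold : List Int := []
def pvDiffWitnessOut_find_monotonic_intervals_without_threshold : (List (Int × Int)) × (List (Int × Int)) := ([(0, -1)], [])

-- ===== CLAIM (what is proved, stated in full; the proofs are below) =====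
def Claim_unchanged_find_monotonic_intervals_without_threshold : Prop := ∀ (arr : List Int), Dom_find_monotonic_intervals_without_threshold arr → Spec_find_monotonic_intervals_without_threshold arr (find_monotonic_intervals_without_threshold arr)
def Claim_changed_find_monotonic_intervals_without_threshold : Prop := Dom_find_monotonic_intervals_without_threshold (pvDiffWitness_find_monotonic_intervals_without_threshold) ∧ D_find_monotonic_intervals_without_threshold (pvDiffWitness_find_monotonic_intervals_without_threshold) ∧ find_monotonic_intervals_without_threshold (pvDiffWitness_find_monotonic_intervals_without_threshold) = pvDiffWitnessOut_find_monotonic_intervals_without_threshold.1 ∧ find_monotonic_intervals_without_threshold_alt (pvDiffWitness_find_monotonic_intervals_without_threshold) = pvDiffWitnessOut_find_monotonic_intervals_without_threshold.2 ∧ pvDiffWitnessOut_find_monotonic_intervals_without_threshold.1 ≠ pvDiffWitnessOut_find_monotonic_intervals_without_threshold.2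
def Claim_exact_find_monotonic_intervals_without_threshold : Prop := ∀ (arr : List Int), Dom_find_monotonic_intervals_without_threshold arr → D_find_monotonic_intervals_without_threshold arr → find_monotonic_intervals_without_threshold arr ≠ find_monotonic_intervals_without_threshold_alt arr

-- ===== LEMMAS AND PROOFS =====

-- Common reference: structural recursion splitting the suffix xs (preceded by prev,
-- starting at absolute index i, current run started at s) into runs of equal values.
def pvSplit (s i prev : Int) : List Int → List (Int × Int)
  | [] => [(s, i - 1)]
  | x :: xs => if x < prev ∨ x > prev then (s, i - 1) :: pvSplit i (i + 1) x xs
               else pvSplit s (i + 1) x xs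

-- A's fold over the index range, written recursively.
def pvRuns (p : Int → Prop) [DecidablePred p] (e : Int) : Int → List Int → List (Int × Int)
  | s, [] => [(s, e)]
  | s, i :: rest => if p i then (s, i - 1) :: pvRuns p e i rest else pvRuns p e s rest

theorem pvRuns_foldl (p : Int → Prop) [DecidablePred p] (e : Int) (is : List Int)
    (acc : List (Int × Int)) (s : Int) :
    (is.foldl (fun (st : List (Int × Int) × Int) (i : Int) =>
        if p i then (st.1 ++ [(st.2, i - 1)], i) else st) (acc, s)).1
      ++ [((is.foldl (fun (st : List (Int × Int) × Int) (i : Int) =>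
        if p i then (st.1 ++ [(st.2, i - 1)], i) else st) (acc, s)).2, e)]
      = acc ++ pvRuns p e s is := by
  induction is generalizing acc s with
  | nil => simp [pvRuns]
  | cons i rest ih =>
    by_cases h : p i <;>
      simp [pvRuns, h, List.foldl_cons, ih, List.append_assoc]

-- Index view → structural view: pvRuns over range(k+1, len) with A's array-indexing
-- predicate equals pvSplit over the suffix arr.drop k = prev :: xs.
theorem pvRuns_eq_pvSplit (arr : List Int) (k : Nat) (prev : Int) (xs : List Int) (s : Int)
    (h : arr.drop k = prev :: xs) :
    pvRuns (fun j => PySem.List.pyGetD arr j 0 < PySem.List.pyGetD arr (j - 1) 0 ∨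
                     PySem.List.pyGetD arr j 0 > PySem.List.pyGetD arr (j - 1) 0)
      ((arr.length : Int) - 1) s (PySem.List.pyRange ((k : Int) + 1) (arr.length : Int) 1)
      = pvSplit s ((k : Int) + 1) prev xs := by
  induction xs generalizing k prev s with
  | nil =>
    have hlen : arr.length = k + 1 := by
      have := congrArg List.length h
      simp [List.length_drop] at this
      omega
    rw [PySem.List.pyRange_one_eq_nil (by omega)]
    simp [pvRuns, pvSplit, hlen]
  | cons x xs ih =>
    have hlen : k + 1 < arr.length := by
      have := congrArg List.length h
      simp [List.length_drop] at this
      omega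
    have hk : arr[k]? = some prev := by
      have : (arr.drop k)[0]? = some prev := by rw [h]; rfl
      simpa [List.getElem?_drop] using this
    have hk1 : arr[k + 1]? = some x := by
      have : (arr.drop k)[1]? = some x := by rw [h]; rfl
      simpa [List.getElem?_drop] using this
    have hdrop : arr.drop (k + 1) = x :: xs := by
      have h2 : (arr.drop k).tail = x :: xs := by rw [h]; rfl
      rwa [List.tail_drop] at h2
    have hgk : PySem.List.pyGetD arr ((k : Int) + 1 - 1) 0 = prev := by
      have : ((k : Int) + 1 - 1) = ((k : Nat) : Int) := by omega
      rw [this, PySem.List.pyGetD_natCast]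
      simp [List.getD, hk]
    have hgk1 : PySem.List.pyGetD arr ((k : Int) + 1) 0 = x := by
      have : ((k : Int) + 1) = (((k + 1 : Nat)) : Int) := by push_cast; ring
      rw [this, PySem.List.pyGetD_natCast]
      simp [List.getD, hk1]
    rw [PySem.List.pyRange_one_cons (by exact_mod_cast hlen)]
    have hcast : ((k : Int) + 1 + 1) = (((k + 1 : Nat) : Int) + 1) := by push_cast; ring
    by_cases hd : x < prev ∨ x > prev
    · have hC : PySem.List.pyGetD arr ((k : Int) + 1) 0 < PySem.List.pyGetD arr ((k : Int) + 1 - 1) 0 ∨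
          PySem.List.pyGetD arr ((k : Int) + 1) 0 > PySem.List.pyGetD arr ((k : Int) + 1 - 1) 0 := by
        rw [hgk1, hgk]; exact hd
      simp only [pvRuns, pvSplit]
      rw [if_pos hC, if_pos hd, hcast, ih (k + 1) x ((k : Int) + 1) hdrop]
    · have hC : ¬ (PySem.List.pyGetD arr ((k : Int) + 1) 0 < PySem.List.pyGetD arr ((k : Int) + 1 - 1) 0 ∨
          PySem.List.pyGetD arr ((k : Int) + 1) 0 > PySem.List.pyGetD arr ((k : Int) + 1 - 1) 0) := by
        rw [hgk1, hgk]; exact hd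
      simp only [pvRuns, pvSplit]
      rw [if_neg hC, if_neg hd, hcast, ih (k + 1) x s hdrop]

-- B's pass 1, written recursively: run lengths of prev::xs with current run length k.
def pvRLE (prev k : Int) : List Int → List Int
  | [] => [k]
  | x :: xs => if x < prev ∨ x > prev then k :: pvRLE x 1 xs else pvRLE x (k + 1) xs

theorem pvRLE_foldl (xs : List Int) (acc : List Int) (k prev : Int) :
    (xs.foldl (fun (st : List Int × Int) (x : Int) =>
        if st.1 ≠ [] ∧ ¬ (x < st.2 ∨ x > st.2) then
          (st.1.dropLast ++ [st.1.getLastD 0 + 1], x)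
        else (st.1 ++ [1], x)) (acc ++ [k], prev)).1
      = acc ++ pvRLE prev k xs := by
  induction xs generalizing acc k prev with
  | nil => simp [pvRLE]
  | cons x rest ih =>
    by_cases hd : x < prev ∨ x > prev
    · have : ¬ ((acc ++ [k] ≠ []) ∧ ¬ (x < prev ∨ x > prev)) := by simp [hd]
      simp only [List.foldl_cons, if_neg this, pvRLE, if_pos hd, List.append_assoc]
      exact (List.append_assoc acc [k] _) ▸ (by
        have := ih (acc ++ [k]) 1 x
        simpa [List.append_assoc] using this)
    · have hcond : ((acc ++ [k] ≠ []) ∧ ¬ (x < prev ∨ x > prev)) := by simp [hd]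
      simp only [List.foldl_cons, if_pos hcond, pvRLE, if_neg hd,
        List.dropLast_concat, List.getLastD_concat]
      exact ih acc (k + 1) x

-- B's pass 2, written recursively: lengths → intervals, accumulating the offset.
def pvIv (pos : Int) : List Int → List (Int × Int)
  | [] => []
  | n :: ls => (pos, pos + n - 1) :: pvIv (pos + n) ls

theorem pvIv_foldl (ls : List Int) (acc : List (Int × Int)) (pos : Int) :
    (ls.foldl (fun (st : List (Int × Int) × Int) (n : Int) =>
        (st.1 ++ [(st.2, st.2 + n - 1)], st.2 + n)) (acc, pos)).1
      = acc ++ pvIv pos ls := by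
  induction ls generalizing acc pos with
  | nil => simp [pvIv]
  | cons n rest ih => simp [pvIv, List.foldl_cons, ih, List.append_assoc]

-- Bridge: converting the run lengths of prev::xs equals splitting directly,
-- with absolute index i = s + k.
theorem pvIv_pvRLE (xs : List Int) (prev s k : Int) :
    pvIv s (pvRLE prev k xs) = pvSplit s (s + k) prev xs := by
  induction xs generalizing prev s k with
  | nil => simp [pvRLE, pvIv, pvSplit]
  | cons x rest ih =>
    by_cases hd : x < prev ∨ x > prev
    · simp only [pvRLE, pvSplit, if_pos hd, pvIv]
      rw [ih x (s + k) 1]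
    · simp only [pvRLE, pvSplit, if_neg hd]
      rw [ih x s (k + 1), show s + (k + 1) = s + k + 1 from by ring]

-- ===== VERDICT (by name: the statement is the Claim_ definition above) =====
theorem find_monotonic_intervals_without_threshold_spec : Claim_unchanged_find_monotonic_intervals_without_threshold := by
  intro arr _ hD
  cases arr with
  | nil => exact absurd rfl hD
  | cons a rest =>
    show find_monotonic_intervals_without_threshold (a :: rest)
        = find_monotonic_intervals_without_threshold_alt (a :: rest)
    unfold find_monotonic_intervals_without_threshold
      find_monotonic_intervals_without_threshold_alt
    simp only [List.foldl_cons]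
    have hfirst : (if (([] : List Int) ≠ [] ∧ ¬ (a < (0:Int) ∨ a > (0:Int))) then
          (([] : List Int).dropLast ++ [([] : List Int).getLastD 0 + 1], a)
        else (([] : List Int) ++ [1], a)) = (([] : List Int) ++ [1], a) := by simp
    rw [hfirst]
    rw [pvRLE_foldl rest [] 1 a]
    simp only [List.nil_append]
    rw [pvIv_foldl (pvRLE a 1 rest) [] 0]
    rw [pvRuns_foldl (fun j => PySem.List.pyGetD (a :: rest) j 0 < PySem.List.pyGetD (a :: rest) (j - 1) 0 ∨
          PySem.List.pyGetD (a :: rest) j 0 > PySem.List.pyGetD (a :: rest) (j - 1) 0)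
        (((a :: rest).length : Int) - 1) _ [] 0]
    have h01 : (1 : Int) = ((0 : Nat) : Int) + 1 := by norm_num
    rw [show PySem.List.pyRange 1 (((a :: rest).length : Int)) 1
          = PySem.List.pyRange (((0 : Nat) : Int) + 1) (((a :: rest).length : Int)) 1 by rw [← h01]]
    rw [pvRuns_eq_pvSplit (a :: rest) 0 a rest 0 (by simp)]
    rw [pvIv_pvRLE rest a 0 1]
    norm_num

theorem find_monotonic_intervals_without_threshold_changed : Claim_changed_find_monotonic_intervals_without_threshold := by unfold Claim_changed_find_monotonic_intervals_without_threshold; decide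
theorem find_monotonic_intervals_without_threshold_tight : Claim_exact_find_monotonic_intervals_without_threshold := by
  intro arr _ hD
  subst hD
  decide
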